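-- pv_equiv track=rewrite | github.com/ncsu-landscape-dynamics/popsborder | popsborder/contamination.py | _contaminated_items_to_cluster_sizes
-- ===== SOURCE A (Python) =====
-- def _contaminated_items_to_cluster_sizes(
--         contaminated_items, contaminated_units_per_cluster
-- ):
--     """Get list of cluster sizes for a given number of contaminated items
--
--     The size of each cluster is limited by contaminated_units_per_cluster.
--     """
--     if contaminated_items > contaminated_units_per_cluster:
--         # Split into n clusters so that n-1 clusters have the max size and
--         # the last one has the remaining items.
--         # Alternative would be sth like:
--         # round(contaminated_items/contaminated_units_per_cluster)
--         sum_items = 0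
--         cluster_sizes = []
--         while sum_items < contaminated_items - contaminated_units_per_cluster:
--             sum_items += contaminated_units_per_cluster
--             cluster_sizes.append(contaminated_units_per_cluster)
--         # add remaining items
--         cluster_sizes.append(contaminated_items - sum_items)
--         sum_items += contaminated_items - sum_items
--         assert sum_items == contaminated_items
--     else:
--         cluster_sizes = [contaminated_items]
--     return cluster_sizes
-- ===== SOURCE B (Python) =====
-- def _contaminated_items_to_cluster_sizes(
--         contaminated_items, contaminated_units_per_cluster
-- ):
--     """Get list of cluster sizes for a given number of contaminated items
--
--     The size of each cluster is limited by contaminated_units_per_cluster.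
--     """
--     if contaminated_items <= contaminated_units_per_cluster:
--         return [contaminated_items]
--     q, m = divmod(contaminated_items, contaminated_units_per_cluster)
--     if m == 0:
--         full, last = q - 1, contaminated_units_per_cluster
--     else:
--         full, last = q, m
--     return [contaminated_units_per_cluster] * full + [last]
-- ===== Notes on version B (the rewrite author's own statement) =====
-- stated objective: simpler
-- what changed: Replaces the while-loop that accumulates full clusters one by one with a closed-form divmod computation of the number of full clusters and the remainder, built via list multiplication.
import Mathlib
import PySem

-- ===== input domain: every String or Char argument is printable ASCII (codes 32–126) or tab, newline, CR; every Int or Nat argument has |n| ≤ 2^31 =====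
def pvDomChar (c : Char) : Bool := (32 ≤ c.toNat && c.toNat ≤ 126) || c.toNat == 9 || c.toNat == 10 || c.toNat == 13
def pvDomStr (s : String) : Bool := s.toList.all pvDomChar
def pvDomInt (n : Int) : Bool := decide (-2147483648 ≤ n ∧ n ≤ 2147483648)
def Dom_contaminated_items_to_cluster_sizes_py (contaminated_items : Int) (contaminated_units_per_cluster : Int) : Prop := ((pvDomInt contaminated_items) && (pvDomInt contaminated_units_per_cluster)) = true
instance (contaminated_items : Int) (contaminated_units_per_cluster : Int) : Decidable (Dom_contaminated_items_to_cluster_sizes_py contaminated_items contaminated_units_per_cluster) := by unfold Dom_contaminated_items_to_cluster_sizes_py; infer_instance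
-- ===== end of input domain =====

-- B replaces A's while-loop accumulation by a closed-form divmod split (same return value on Pre_).

-- ===== PORT A =====
-- the while-loop of A, with fuel; fuel (contaminated_items - cap).toNat is enough
-- for every input Pre_ admits (cap ≥ 1 there, so each step raises sum by ≥ 1)
def pvALoop : Nat → Int → Int → Int → List Int → Int × List Int
  | 0, _, _, sum_items, cluster_sizes => (sum_items, cluster_sizes)
  | fuel + 1, items, cap, sum_items, cluster_sizes =>
    if sum_items < items - cap then
      pvALoop fuel items cap (sum_items + cap) (cluster_sizes ++ [cap])
    else (sum_items, cluster_sizes)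

def contaminated_items_to_cluster_sizes_py (contaminated_items : Int) (contaminated_units_per_cluster : Int) : List Int :=
  if contaminated_items > contaminated_units_per_cluster then
    let r := pvALoop (contaminated_items - contaminated_units_per_cluster).toNat
      contaminated_items contaminated_units_per_cluster 0 []
    r.2 ++ [contaminated_items - r.1]
  else [contaminated_items]

-- ===== PORT B =====
def contaminated_items_to_cluster_sizes_py_alt (contaminated_items : Int) (contaminated_units_per_cluster : Int) : List Int :=
  if contaminated_items ≤ contaminated_units_per_cluster then [contaminated_items]
  else
    match PySem.Int.divmod? contaminated_items contaminated_units_per_cluster with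
    | none => []  -- ZeroDivisionError in Python; excluded by Pre_
    | some (q, m) =>
      if m = 0 then
        List.replicate (q - 1).toNat contaminated_units_per_cluster ++ [contaminated_units_per_cluster]
      else
        List.replicate q.toNat contaminated_units_per_cluster ++ [m]

-- ===== PRECONDITION & SPEC =====
-- Pre_ excludes only inputs on which A never returns: with a non-positive cap and
-- contaminated_items above it, A's while-loop runs forever (and B would raise on cap = 0).
def Pre_contaminated_items_to_cluster_sizes_py (contaminated_items : Int) (contaminated_units_per_cluster : Int) : Prop :=
  contaminated_items ≤ contaminated_units_per_cluster ∨ 1 ≤ contaminated_units_per_cluster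
instance (contaminated_items : Int) (contaminated_units_per_cluster : Int) : Decidable (Pre_contaminated_items_to_cluster_sizes_py contaminated_items contaminated_units_per_cluster) := by unfold Pre_contaminated_items_to_cluster_sizes_py; infer_instance

def pvWitness_contaminated_items_to_cluster_sizes_py : Int × Int := (7, 3)

def Spec_contaminated_items_to_cluster_sizes_py (contaminated_items : Int) (contaminated_units_per_cluster : Int) (out : List Int) : Prop := out = contaminated_items_to_cluster_sizes_py_alt contaminated_items contaminated_units_per_cluster
instance (contaminated_items : Int) (contaminated_units_per_cluster : Int) (out : List Int) : Decidable (Spec_contaminated_items_to_cluster_sizes_py contaminated_items contaminated_units_per_cluster out) := by unfold Spec_contaminated_items_to_cluster_sizes_py; infer_instance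

-- ===== CLAIM (what is proved, stated in full; the proofs are below) =====
def Claim_equal_contaminated_items_to_cluster_sizes_py : Prop := ∀ (contaminated_items : Int) (contaminated_units_per_cluster : Int), Dom_contaminated_items_to_cluster_sizes_py contaminated_items contaminated_units_per_cluster → Pre_contaminated_items_to_cluster_sizes_py contaminated_items contaminated_units_per_cluster → Spec_contaminated_items_to_cluster_sizes_py contaminated_items contaminated_units_per_cluster (contaminated_items_to_cluster_sizes_py contaminated_items contaminated_units_per_cluster)

-- ===== LEMMAS AND PROOFS =====

-- With k * cap < items - sum ≤ (k + 1) * cap the loop runs exactly k more times.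
lemma pvALoop_run (items cap : Int) (hp : 1 ≤ cap) :
    ∀ (k fuel : Nat) (sum : Int) (acc : List Int),
      (k : Int) * cap < items - sum → items - sum ≤ ((k : Int) + 1) * cap → k ≤ fuel →
      pvALoop fuel items cap sum acc = (sum + (k : Int) * cap, acc ++ List.replicate k cap) := by
  intro k
  induction k with
  | zero =>
    intro fuel sum acc h1 h2 _
    cases fuel with
    | zero => simp [pvALoop]
    | succ f =>
      have : ¬ sum < items - cap := by push_cast at h2 ⊢; linarith
      simp [pvALoop, this]
  | succ k ih =>
    intro fuel sum acc h1 h2 hf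
    cases fuel with
    | zero => omega
    | succ f =>
      have hx : ((k : Int) + 1) * cap = (k : Int) * cap + cap := by ring
      have hkc : (0 : Int) ≤ (k : Int) * cap := by positivity
      have hcond : sum < items - cap := by push_cast at h1; linarith
      have hrec := ih f (sum + cap) (acc ++ [cap])
        (by push_cast at h1 ⊢; linarith)
        (by push_cast at h2 ⊢; linarith)
        (by omega)
      simp only [pvALoop, if_pos hcond, hrec, Prod.mk.injEq]
      refine ⟨by push_cast; ring, ?_⟩
      simp [List.replicate_succ]

lemma toNat_le_toNat' {a b : Int} (h : a ≤ b) : a.toNat ≤ b.toNat := by omega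

-- ===== VERDICT (by name: the statement is the Claim_ definition above) =====
theorem contaminated_items_to_cluster_sizes_py_spec : Claim_equal_contaminated_items_to_cluster_sizes_py := by
  intro items cap _ hpre
  unfold Spec_contaminated_items_to_cluster_sizes_py
  unfold contaminated_items_to_cluster_sizes_py contaminated_items_to_cluster_sizes_py_alt
  by_cases hle : items ≤ cap
  · simp [hle, not_lt.mpr hle]
  · have hgt : cap < items := lt_of_not_ge hle
    have hp : 1 ≤ cap := by
      cases hpre with
      | inl h => exact absurd h hle
      | inr h => exact h
    have hcap0 : cap ≠ 0 := by omega
    simp only [if_neg hle, if_pos hgt]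
    have hdm : PySem.Int.divmod? items cap
        = some (PySem.Int.floordiv items cap, PySem.Int.mod items cap) := by
      simp [PySem.Int.divmod?, PySem.Int.floordiv, PySem.Int.mod, hcap0]
    rw [hdm]
    set q := PySem.Int.floordiv items cap with hq
    set m := PySem.Int.mod items cap with hm
    have hqm : q * cap + m = items := PySem.Int.floordiv_mul_add_mod items cap
    have hm0 : 0 ≤ m := by
      rw [hm, PySem.Int.mod_eq_emod_of_pos (by omega : (0:Int) < cap)]
      exact Int.emod_nonneg _ hcap0
    have hmlt : m < cap := by
      rw [hm, PySem.Int.mod_eq_emod_of_pos (by omega : (0:Int) < cap)]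
      exact Int.emod_lt_of_pos _ (by omega)
    by_cases hmz : m = 0
    · -- items = q * cap, q ≥ 2; loop runs q - 1 times
      have hiq : items = q * cap := by omega
      have hq2 : 2 ≤ q := by nlinarith
      have hk : ((q - 1).toNat : Int) = q - 1 := by omega
      have hrun := pvALoop_run items cap hp (q - 1).toNat (items - cap).toNat 0 []
        (by rw [hk]; nlinarith)
        (by rw [hk]; nlinarith)
        (by
          apply toNat_le_toNat'
          nlinarith)
      simp only [hrun, if_pos hmz]
      simp only [List.nil_append] at *
      rw [hk]
      have hfin : items - (0 + (q - 1) * cap) = cap := by rw [hiq]; ring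
      rw [hfin]
    · -- 0 < m < cap; loop runs q times
      have hm1 : 1 ≤ m := by omega
      have hq1 : 1 ≤ q := by nlinarith
      have hk : (q.toNat : Int) = q := by omega
      have hrun := pvALoop_run items cap hp q.toNat (items - cap).toNat 0 []
        (by rw [hk]; nlinarith)
        (by rw [hk]; nlinarith)
        (by
          apply toNat_le_toNat'
          nlinarith)
      simp only [hrun, if_neg hmz]
      simp only [List.nil_append] at *
      rw [hk]
      have hfin : items - (0 + q * cap) = m := by linarith
      rw [hfin]
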